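-- pv_equiv track=rewrite | github.com/clabbe13/Simple-Bioinformatic-Tools | Bioinformatics Tool.py | find_stop_codon
-- ===== SOURCE A (Python) =====
-- def find_stop_codon(sequence):
--     """
--     Finds the stop codon
--     :param sequence: Input sequence
--     :return: List of Stop Codon locations
--     """
--     stop_codon = []  ##Empty list intialized
--     orf = 0  ##Variable orf set to 0
--     stop = "TAA", "TGA", "TAG"
--     for i in sequence:
--         if sequence [orf:orf + 3] in stop:  ##Searches for stop codon
--             stop_codon.append(orf)  ##Adds them to the list
--         orf += 1
--     return stop_codon  ##Returns list with stop codon locations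
-- ===== SOURCE B (Python) =====
-- def find_stop_codon(sequence):
--     """
--     Finds the stop codon
--     :param sequence: Input sequence
--     :return: List of Stop Codon locations
--     """
--     positions = []
--     for codon in ("TAA", "TGA", "TAG"):
--         start = 0
--         while True:
--             pos = sequence.find(codon, start)
--             if pos == -1:
--                 break
--             positions.append(pos)
--             start = pos + 1
--     positions.sort()
--     return positions
-- ===== Notes on version B (the rewrite author's own statement) =====
-- stated objective: faster
-- what changed: Replaces A's per-position slice-and-membership scan with three per-codon str.find loops (advancing by pos+1 to keep overlaps) whose merged hit lists are sorted at the end.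
import Mathlib
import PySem

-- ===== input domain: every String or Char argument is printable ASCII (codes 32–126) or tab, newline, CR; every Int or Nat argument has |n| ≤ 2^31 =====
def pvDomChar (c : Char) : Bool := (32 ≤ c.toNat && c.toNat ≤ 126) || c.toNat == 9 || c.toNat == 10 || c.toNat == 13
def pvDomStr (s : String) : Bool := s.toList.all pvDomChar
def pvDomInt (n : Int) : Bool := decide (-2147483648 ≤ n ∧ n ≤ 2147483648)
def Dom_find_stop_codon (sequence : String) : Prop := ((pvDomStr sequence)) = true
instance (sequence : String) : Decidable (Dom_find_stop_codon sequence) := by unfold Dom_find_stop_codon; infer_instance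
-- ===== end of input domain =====

-- B replaces A's per-position slice/membership scan by three per-codon find loops whose merged
-- hit lists are sorted at the end; measured faster in Python by a constant factor.

-- ===== PORT A =====
def find_stop_codon (sequence : String) : List Int :=
  let stop : List String := ["TAA", "TGA", "TAG"]
  (sequence.toList.foldl
    (fun (st : List Int × Int) (_i : Char) =>
      (if stop.contains (PySem.Str.slice sequence (some st.2) (some (st.2 + 3))) then
          st.1 ++ [st.2]
        else st.1,
       st.2 + 1))
    ([], 0)).1

-- ===== PORT B =====
-- the inner `while True: pos = sequence.find(codon, start) …` loop of Source B;
-- fuel (length + 1) strictly bounds the number of iterations since start strictly increases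
def findLoop (sequence codon : String) (start : Nat) : Nat → List Int
  | 0 => []
  | fuel + 1 =>
    let pos := PySem.Str.findFrom sequence codon (start : Int)
    if pos = -1 then [] else pos :: findLoop sequence codon (pos.toNat + 1) fuel

def find_stop_codon_alt (sequence : String) : List Int :=
  let positions := (["TAA", "TGA", "TAG"] : List String).foldl
    (fun acc codon => acc ++ findLoop sequence codon 0 (sequence.toList.length + 1)) []
  PySem.List.sorted positions (fun x => x)

-- ===== PRECONDITION & SPEC =====
def Spec_find_stop_codon (sequence : String) (out : List Int) : Prop := out = find_stop_codon_alt sequence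
instance (sequence : String) (out : List Int) : Decidable (Spec_find_stop_codon sequence out) := by unfold Spec_find_stop_codon; infer_instance

-- ===== CLAIM (what is proved, stated in full; the proofs are below) =====
def Claim_equal_find_stop_codon : Prop := ∀ (sequence : String), Dom_find_stop_codon sequence → Spec_find_stop_codon sequence (find_stop_codon sequence)

-- ===== LEMMAS AND PROOFS =====

-- whether A's condition fires at position i
def matchAt (sequence : String) (i : Nat) : Bool :=
  (["TAA", "TGA", "TAG"] : List String).contains
    (PySem.Str.slice sequence (some (i : Int)) (some ((i : Int) + 3)))

lemma slice_eq_iff (sequence : String) (i : Nat) (C : String) (hC : C.toList.length = 3) :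
    (PySem.Str.slice sequence (some (i : Int)) (some ((i : Int) + 3)) = C) ↔
      C.toList <+: sequence.toList.drop i := by
  have h3 : ((i : Int) + 3) = ((i + 3 : Nat) : Int) := by push_cast; ring
  have hs : (PySem.Str.slice sequence (some (i : Int)) (some ((i : Int) + 3))).toList
      = (sequence.toList.drop i).take 3 := by
    rw [h3, PySem.Str.toList_slice, PySem.Chars.slice_eq_listSlice, PySem.List.slice_natCast]
    congr 1; omega
  constructor
  · intro h
    rw [List.prefix_iff_eq_take, hC, ← hs, h]
  · intro h
    apply String.toList_injective
    rw [hs]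
    rw [List.prefix_iff_eq_take, hC] at h
    exact h.symm

lemma matchAt_iff (sequence : String) (i : Nat) :
    matchAt sequence i = true ↔
      (['T','A','A'] <+: sequence.toList.drop i ∨ ['T','G','A'] <+: sequence.toList.drop i ∨
        ['T','A','G'] <+: sequence.toList.drop i) := by
  simp only [matchAt, List.contains_eq_mem, List.mem_cons, List.not_mem_nil, or_false,
    decide_eq_true_eq]
  rw [slice_eq_iff sequence i "TAA" (by decide), slice_eq_iff sequence i "TGA" (by decide),
    slice_eq_iff sequence i "TAG" (by decide)]
  rfl

lemma foldA (sequence : String) :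
    ∀ (l : List Char) (a : List Int) (k : Nat),
    (l.foldl
      (fun (st : List Int × Int) (_i : Char) =>
        (if (["TAA", "TGA", "TAG"] : List String).contains
              (PySem.Str.slice sequence (some st.2) (some (st.2 + 3))) then
            st.1 ++ [st.2]
          else st.1,
         st.2 + 1))
      (a, (k : Int))).1
    = a ++ List.map (fun i : Nat => (i : Int)) (List.filter (matchAt sequence) (List.range' k l.length)) := by
  intro l
  induction l with
  | nil => intro a k; simp
  | cons c t ih =>
    intro a k
    have hk1 : ((k : Int) + 1) = ((k + 1 : Nat) : Int) := by push_cast; ring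
    simp only [List.foldl_cons, List.length_cons, List.range'_succ, List.filter_cons]
    have hcond : (["TAA", "TGA", "TAG"] : List String).contains
        (PySem.Str.slice sequence (some ((k : Nat) : Int)) (some (((k : Nat) : Int) + 3)))
        = matchAt sequence k := rfl
    rw [hcond, hk1]
    cases hm : matchAt sequence k
    · rw [if_neg (by simp), if_neg (by simp), ih a (k + 1)]
    · rw [if_pos (by simp), if_pos (by simp), ih (a ++ [((k : Nat) : Int)]) (k + 1)]
      simp

lemma portA_eq (sequence : String) :
    find_stop_codon sequence =
      List.map (fun i : Nat => (i : Int))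
        (List.filter (matchAt sequence) (List.range sequence.toList.length)) := by
  have h := foldA sequence sequence.toList [] 0
  simp only [Nat.cast_zero] at h
  simp only [find_stop_codon]
  rw [h, List.range_eq_range']
  simp

lemma prefix_lt (cs c : List Char) (i : Nat) (hc : c.length = 3) (h : c <+: cs.drop i) :
    i + 3 ≤ cs.length := by
  have h1 := h.length_le
  simp [List.length_drop, hc] at h1
  by_cases hi : i ≤ cs.length
  · omega
  · exfalso
    rw [List.drop_eq_nil_of_le (by omega)] at h
    have := h.length_le
    simp [hc] at this

lemma findLoop_spec (sequence codon : String) (hc : codon.toList.length = 3) :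
    ∀ (fuel start : Nat), start ≤ sequence.toList.length →
      sequence.toList.length + 1 ≤ fuel + start →
      (∀ x : Int, x ∈ findLoop sequence codon start fuel ↔
        ∃ i : Nat, start ≤ i ∧ codon.toList <+: sequence.toList.drop i ∧ x = (i : Int))
      ∧ (findLoop sequence codon start fuel).Pairwise (· < ·) := by
  intro fuel
  induction fuel with
  | zero => intro start h1 h2; omega
  | succ fuel ih =>
    intro start h1 h2
    by_cases hp : PySem.Str.findFrom sequence codon (start : Int) = -1
    · rw [PySem.Str.findFrom_eq, PySem.Chars.findFrom_natCast_eq_neg_one_iff _ _ start h1] at hp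
      simp only [findLoop, PySem.Str.findFrom_eq] at *
      rw [if_pos (by rw [PySem.Chars.findFrom_natCast_eq_neg_one_iff _ _ start h1]; exact hp)]
      refine ⟨fun x => ?_, List.Pairwise.nil⟩
      simp only [List.not_mem_nil, false_iff]
      rintro ⟨i, hsi, hpre, rfl⟩
      apply hp
      rw [← PySem.Chars.isIn_iff_infix, ← PySem.Chars.exists_prefix_drop_iff_isIn]
      refine ⟨i - start, ?_⟩
      rw [List.drop_drop]
      have hi : start + (i - start) = i := by omega
      rwa [hi]
    · have hspec := PySem.Chars.findFrom_natCast_spec sequence.toList codon.toList start h1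
        (by rwa [PySem.Str.findFrom_eq] at hp)
      rw [← PySem.Str.findFrom_eq] at hspec
      set p := PySem.Str.findFrom sequence codon (start : Int) with hpdef
      obtain ⟨hle, hpre, hmin⟩ := hspec
      have hp0 : 0 ≤ p := le_trans (by positivity) hle
      have hq : p = ((p.toNat : Nat) : Int) := (Int.toNat_of_nonneg hp0).symm
      have hsq : start ≤ p.toNat := by omega
      have hlen : p.toNat + 3 ≤ sequence.toList.length := prefix_lt _ _ _ hc hpre
      have ihh := ih (p.toNat + 1) (by omega) (by omega)
      have heq : findLoop sequence codon start (fuel + 1)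
          = p :: findLoop sequence codon (p.toNat + 1) fuel := by
        simp only [findLoop]; rw [if_neg hp]
      rw [heq]
      constructor
      · intro x
        rw [List.mem_cons, ihh.1 x]
        constructor
        · rintro (rfl | ⟨i, hsi2, hpre2, rfl⟩)
          · exact ⟨p.toNat, hsq, hpre, hq⟩
          · exact ⟨i, by omega, hpre2, rfl⟩
        · rintro ⟨i, hsi2, hpre2, rfl⟩
          rcases lt_trichotomy i p.toNat with h | h | h
          · exact absurd hpre2 (hmin i hsi2 h)
          · subst h; left; exact hq.symm
          · right; exact ⟨i, by omega, hpre2, rfl⟩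
      · refine List.Pairwise.cons ?_ ihh.2
        intro y hy
        obtain ⟨i, hsi2, _, rfl⟩ := (ihh.1 y).1 hy
        omega

lemma portB_eq (sequence : String) :
    find_stop_codon_alt sequence =
      List.map (fun i : Nat => (i : Int))
        (List.filter (matchAt sequence) (List.range sequence.toList.length)) := by
  set n := sequence.toList.length with hn
  have hA := findLoop_spec sequence "TAA" (by decide) (n + 1) 0 (Nat.zero_le _) (by omega)
  have hG := findLoop_spec sequence "TGA" (by decide) (n + 1) 0 (Nat.zero_le _) (by omega)
  have hJ := findLoop_spec sequence "TAG" (by decide) (n + 1) 0 (Nat.zero_le _) (by omega)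
  set LA := findLoop sequence "TAA" 0 (n + 1)
  set LG := findLoop sequence "TGA" 0 (n + 1)
  set LJ := findLoop sequence "TAG" 0 (n + 1)
  have hpairR : List.Pairwise (fun a b : Int => a < b)
      (List.map (fun i : Nat => (i : Int)) (List.filter (matchAt sequence) (List.range n))) :=
    (List.pairwise_lt_range.filter _).map _ (fun a b h => by exact_mod_cast h)
  have halt : find_stop_codon_alt sequence = PySem.List.sorted (LA ++ LG ++ LJ) (fun x => x) := rfl
  rw [halt]
  apply PySem.List.sorted_eq_of_perm_of_pairwise_lt _ _ _ _ hpairR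
  · have ndR : (List.map (fun i : Nat => (i : Int)) (List.filter (matchAt sequence) (List.range n))).Nodup :=
      hpairR.imp (fun h => ne_of_lt h)
    have ndA : LA.Nodup := hA.2.imp (fun h => ne_of_lt h)
    have ndG : LG.Nodup := hG.2.imp (fun h => ne_of_lt h)
    have ndJ : LJ.Nodup := hJ.2.imp (fun h => ne_of_lt h)
    -- disjointness: at most one codon matches at a given position
    have key : ∀ (x : Int) (c1 c2 : List Char), c1.length = 3 → c2.length = 3 →
        (∃ i : Nat, 0 ≤ i ∧ c1 <+: sequence.toList.drop i ∧ x = (i : Int)) →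
        (∃ i : Nat, 0 ≤ i ∧ c2 <+: sequence.toList.drop i ∧ x = (i : Int)) →
        c1 = c2 := by
      rintro x c1 c2 h1 h2 ⟨i, -, hp1, rfl⟩ ⟨j, -, hp2, hij⟩
      have : j = i := by exact_mod_cast hij.symm
      subst this
      rw [List.prefix_iff_eq_take] at hp1 hp2
      rw [h1] at hp1; rw [h2] at hp2
      rw [hp1, hp2]
    have ndP : (LA ++ LG ++ LJ).Nodup := by
      rw [List.nodup_append, List.nodup_append]
      refine ⟨⟨ndA, ndG, ?_⟩, ndJ, ?_⟩
      · intro a ha b hb rfl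
        have := key a _ _ (by decide) (by decide) ((hA.1 a).1 ha) ((hG.1 a).1 hb)
        simp at this
      · intro a ha b hb rfl
        rcases List.mem_append.1 ha with ha | ha
        · have := key a _ _ (by decide) (by decide) ((hA.1 a).1 ha) ((hJ.1 a).1 hb)
          simp at this
        · have := key a _ _ (by decide) (by decide) ((hG.1 a).1 ha) ((hJ.1 a).1 hb)
          simp at this
    rw [List.perm_ext_iff_of_nodup ndR ndP]
    intro a
    simp only [List.mem_map, List.mem_filter, List.mem_range, List.mem_append,
      hA.1 a, hG.1 a, hJ.1 a]
    constructor
    · rintro ⟨i, ⟨hilt, hm⟩, rfl⟩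
      rcases (matchAt_iff sequence i).1 hm with h | h | h
      · exact Or.inl (Or.inl ⟨i, Nat.zero_le _, h, rfl⟩)
      · exact Or.inl (Or.inr ⟨i, Nat.zero_le _, h, rfl⟩)
      · exact Or.inr ⟨i, Nat.zero_le _, h, rfl⟩
    · rintro ((⟨i, -, h, rfl⟩ | ⟨i, -, h, rfl⟩) | ⟨i, -, h, rfl⟩)
      · exact ⟨i, ⟨by have := prefix_lt _ _ _ (by decide) h; omega,
          (matchAt_iff sequence i).2 (Or.inl h)⟩, rfl⟩
      · exact ⟨i, ⟨by have := prefix_lt _ _ _ (by decide) h; omega,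
          (matchAt_iff sequence i).2 (Or.inr (Or.inl h))⟩, rfl⟩
      · exact ⟨i, ⟨by have := prefix_lt _ _ _ (by decide) h; omega,
          (matchAt_iff sequence i).2 (Or.inr (Or.inr h))⟩, rfl⟩

-- ===== VERDICT (by name: the statement is the Claim_ definition above) =====
theorem find_stop_codon_spec : Claim_equal_find_stop_codon := by
  intro sequence _
  unfold Spec_find_stop_codon
  rw [portA_eq, portB_eq]
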